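-- pv_equiv track=rewrite | github.com/conglt98/thesis-paper-kb | src/kb_service/lightrag_backend.py | my_process_combine_contexts
-- ===== SOURCE A (Python) =====
-- def my_process_combine_contexts(hl_context, ll_context):
--     if isinstance(hl_context, str):
--         hl_context = []
--     if isinstance(ll_context, str):
--         ll_context = []
--     seen_content = {}
--     combined_data = []
--     for item in hl_context + ll_context:
--         content_dict = {k: v for k, v in item.items() if k != "id"}
--         content_key = tuple(sorted(content_dict.items()))
--         if content_key not in seen_content:
--             seen_content[content_key] = item
--             combined_data.append(item)
--     for i, item in enumerate(combined_data):
--         item["id"] = str(i)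
--     return combined_data
-- ===== SOURCE B (Python) =====
-- def my_process_combine_contexts(hl_context, ll_context):
--     # Different algorithm: no seen-keys dict at all. Repeatedly take the first
--     # pending item, stamp its id, and filter every later duplicate of its key
--     # out of the pending list (selection-style dedup by repeated filtering).
--     # Like A, this mutates the kept input dicts' "id" in place.
--     if isinstance(hl_context, str):
--         hl_context = []
--     if isinstance(ll_context, str):
--         ll_context = []
--
--     def key(item):
--         return tuple(sorted((k, v) for k, v in item.items() if k != "id"))
--
--     pending = hl_context + ll_context
--     result = []
--     while pending:
--         head = pending[0]
--         k = key(head)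
--         head["id"] = str(len(result))
--         result.append(head)
--         pending = [it for it in pending[1:] if key(it) != k]
--     return result
-- ===== Notes on version B (the rewrite author's own statement) =====
-- stated objective: alternative
-- what changed: Replaces A's seen-keys dict plus separate combined list and second renumbering pass with a dict-free selection-style loop: repeatedly keep the first pending item, stamp its id immediately, and filter all later items with the same content key out of the pending list.
import Mathlib
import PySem

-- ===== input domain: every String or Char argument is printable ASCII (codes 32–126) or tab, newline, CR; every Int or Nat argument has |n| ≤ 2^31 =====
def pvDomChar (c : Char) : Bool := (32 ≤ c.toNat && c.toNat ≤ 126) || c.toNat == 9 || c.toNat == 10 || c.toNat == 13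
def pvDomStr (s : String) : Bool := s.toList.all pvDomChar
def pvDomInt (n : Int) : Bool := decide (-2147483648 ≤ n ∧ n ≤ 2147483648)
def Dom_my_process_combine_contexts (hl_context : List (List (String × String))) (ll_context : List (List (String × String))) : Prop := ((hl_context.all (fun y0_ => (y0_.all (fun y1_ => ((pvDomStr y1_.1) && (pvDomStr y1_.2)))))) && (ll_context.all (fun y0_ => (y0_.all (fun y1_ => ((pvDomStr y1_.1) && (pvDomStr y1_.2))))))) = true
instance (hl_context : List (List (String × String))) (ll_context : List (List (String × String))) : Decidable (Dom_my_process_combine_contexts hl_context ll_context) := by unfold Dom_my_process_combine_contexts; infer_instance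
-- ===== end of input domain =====

-- B replaces A's seen-keys dict + separate combined list + second renumbering pass with a dict-free
-- selection loop: keep the first pending item, stamp its id at once, filter its later duplicates out of
-- the pending list (alternative decomposition). Both Pythons mutate the kept input dicts' "id" key in
-- place exactly alike; the equivalence proved here is about the return value.

-- ===== PORT A =====
-- A's two-phase algorithm: (1) dedup into seen_content + combined_data, (2) enumerate combined_data and set "id".
-- tuple(sorted(content_dict.items())) sorts (key, value) string pairs lexicographically = sorted2 by fst then snd.
-- The isinstance(str) guards of the Python cannot fire on this type (the arguments are lists).
def my_process_combine_contexts (hl_context : List (List (String × String))) (ll_context : List (List (String × String))) : List (List (String × String)) :=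
  let r :=
    (hl_context ++ ll_context).foldl
      (fun (s : PySem.Dict (List (String × String)) (PySem.Dict String String) × List (PySem.Dict String String)) item =>
        let d := PySem.Dict.ofList item
        let content_dict := PySem.Dict.ofList (d.items.filter (fun kv => kv.1 ≠ "id"))
        let content_key := PySem.List.sorted2 content_dict.items (fun kv => kv.1) (fun kv => kv.2) false
        if s.1.contains content_key then s
        else (s.1.insert content_key d, s.2 ++ [d]))
      (PySem.Dict.empty, [])
  (PySem.List.enumerate r.2 0).map (fun p => (p.2.insert "id" (PySem.Int.toStr p.1)).items)

-- ===== PORT B =====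
-- B's key(item): tuple(sorted((k, v) for k, v in item.items() if k != "id"))
def pvBKey (item : List (String × String)) : List (String × String) :=
  PySem.List.sorted2 ((PySem.Dict.ofList item).items.filter (fun kv => kv.1 ≠ "id"))
    (fun kv => kv.1) (fun kv => kv.2) false

-- B's while loop: pending shrinks by head removal + filtering; result accumulates stamped items.
def pvBLoop (pending : List (List (String × String))) (result : List (List (String × String))) :
    List (List (String × String)) :=
  match pending with
  | [] => result
  | head :: rest =>
    let k := pvBKey head
    let head' := ((PySem.Dict.ofList head).insert "id" (PySem.Int.toStr (result.length : Int))).items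
    pvBLoop (rest.filter (fun it => pvBKey it ≠ k)) (result ++ [head'])
termination_by pending.length
decreasing_by
  simp only [List.length_unattach, List.length_cons]
  exact Nat.lt_succ_of_le (le_trans (List.length_filter_le _ _) (le_of_eq (by simp)))

def my_process_combine_contexts_alt (hl_context : List (List (String × String))) (ll_context : List (List (String × String))) : List (List (String × String)) :=
  pvBLoop (hl_context ++ ll_context) []

-- ===== PRECONDITION & SPEC =====
def Spec_my_process_combine_contexts (hl_context : List (List (String × String))) (ll_context : List (List (String × String))) (out : List (List (String × String))) : Prop := out = my_process_combine_contexts_alt hl_context ll_context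
instance (hl_context : List (List (String × String))) (ll_context : List (List (String × String))) (out : List (List (String × String))) : Decidable (Spec_my_process_combine_contexts hl_context ll_context out) := by unfold Spec_my_process_combine_contexts; infer_instance

-- ===== CLAIM (what is proved, stated in full; the proofs are below) =====
def Claim_equal_my_process_combine_contexts : Prop := ∀ (hl_context : List (List (String × String))) (ll_context : List (List (String × String))), Dom_my_process_combine_contexts hl_context ll_context → Spec_my_process_combine_contexts hl_context ll_context (my_process_combine_contexts hl_context ll_context)

-- ===== LEMMAS AND PROOFS =====

-- abbreviation for A's fold body (definitionally the lambda of port A)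
def pvStepA (s : PySem.Dict (List (String × String)) (PySem.Dict String String) × List (PySem.Dict String String))
    (item : List (String × String)) :
    PySem.Dict (List (String × String)) (PySem.Dict String String) × List (PySem.Dict String String) :=
  let d := PySem.Dict.ofList item
  let content_dict := PySem.Dict.ofList (d.items.filter (fun kv => kv.1 ≠ "id"))
  let content_key := PySem.List.sorted2 content_dict.items (fun kv => kv.1) (fun kv => kv.2) false
  if s.1.contains content_key then s
  else (s.1.insert content_key d, s.2 ++ [d])

-- pure dedup skeleton shared by both directions of the proof: keep the head, drop its later duplicates
def pvDD : List (List (String × String)) → List (List (String × String))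
  | [] => []
  | h :: t => h :: pvDD (t.filter (fun it => pvBKey it ≠ pvBKey h))
termination_by xs => xs.length
decreasing_by
  simp only [List.length_unattach, List.length_cons]
  exact Nat.lt_succ_of_le (le_trans (List.length_filter_le _ _) (le_of_eq (by simp)))

theorem pvDD_nil : pvDD [] = [] := by rw [pvDD.eq_def]

theorem pvDD_cons (h : List (String × String)) (t : List (List (String × String))) :
    pvDD (h :: t) = h :: pvDD (t.filter (fun it => pvBKey it ≠ pvBKey h)) := by rw [pvDD.eq_def]

theorem pvBLoop_nil (result : List (List (String × String))) : pvBLoop [] result = result := by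
  rw [pvBLoop.eq_def]

theorem pvBLoop_cons (head : List (String × String)) (rest result : List (List (String × String))) :
    pvBLoop (head :: rest) result
      = pvBLoop (rest.filter (fun it => pvBKey it ≠ pvBKey head))
          (result ++ [((PySem.Dict.ofList head).insert "id" (PySem.Int.toStr (result.length : Int))).items]) := by
  rw [pvBLoop]

-- the stamping map applied to an enumerated deduped item
def pvF (p : Int × List (String × String)) : List (String × String) :=
  ((PySem.Dict.ofList p.2).insert "id" (PySem.Int.toStr p.1)).items

-- a dict built from pairs with pairwise-distinct keys lists exactly those pairs
theorem pv_items_ofList {ν : Type} (l : List (String × ν)) (h : (l.map Prod.fst).Nodup) :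
    (PySem.Dict.ofList l).items = l := by
  have := PySem.Dict.items_foldl_insert_fresh l Prod.fst Prod.snd PySem.Dict.empty
    (fun a _ => by simp [pysem]) h
  simpa [PySem.Dict.ofList, PySem.Dict.update] using this

-- A's key (sorted items of a dict rebuilt from the filtered items) is B's key (sorted filtered items)
theorem pv_key_eq (item : List (String × String)) :
    PySem.List.sorted2 (PySem.Dict.ofList ((PySem.Dict.ofList item).items.filter (fun kv => kv.1 ≠ "id"))).items
      (fun kv => kv.1) (fun kv => kv.2) false
    = pvBKey item := by
  have hnd : (((PySem.Dict.ofList item).items.filter (fun kv => kv.1 ≠ "id")).map Prod.fst).Nodup := by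
    have h1 : ((PySem.Dict.ofList item).items.map Prod.fst).Nodup := by
      simpa [PySem.Dict.keys] using PySem.Dict.nodup_keys_ofList item
    exact h1.sublist (List.Sublist.map Prod.fst List.filter_sublist)
  unfold pvBKey
  rw [pv_items_ofList _ hnd]

theorem pv_enumerate_map {α β : Type} (f : α → β) (xs : List α) (s : Int) :
    PySem.List.enumerate (xs.map f) s = (PySem.List.enumerate xs s).map (fun p => (p.1, f p.2)) := by
  induction xs generalizing s with
  | nil => simp [PySem.List.enumerate_nil]
  | cons x xs ih => simp [PySem.List.enumerate_cons, ih]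

-- A's fold: the combined list is the pure dedup of the items whose key is not already seen
theorem pv_foldA (xs : List (List (String × String)))
    (sA : PySem.Dict (List (String × String)) (PySem.Dict String String))
    (comb : List (PySem.Dict String String)) :
    (xs.foldl pvStepA (sA, comb)).2
      = comb ++ (pvDD (xs.filter (fun it => !sA.contains (pvBKey it)))).map
          (fun it => PySem.Dict.ofList it) := by
  induction xs generalizing sA comb with
  | nil => simp [pvDD_nil]
  | cons h t ih =>
    simp only [List.foldl_cons]
    have hstep : pvStepA (sA, comb) h =
        (if sA.contains (pvBKey h) then (sA, comb)
         else (sA.insert (pvBKey h) (PySem.Dict.ofList h), comb ++ [PySem.Dict.ofList h])) := by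
      simp only [pvStepA, pv_key_eq h]
    rw [hstep]
    by_cases hc : sA.contains (pvBKey h) = true
    · simp only [hc, if_true, List.filter_cons, Bool.not_true, Bool.false_eq_true, if_false]
      exact ih sA comb
    · have hc' : sA.contains (pvBKey h) = false := by simpa using hc
      simp only [hc', Bool.false_eq_true, if_false]
      rw [ih]
      have hfil : t.filter (fun it => !(sA.insert (pvBKey h) (PySem.Dict.ofList h)).contains (pvBKey it))
          = (t.filter (fun it => !sA.contains (pvBKey it))).filter (fun it => pvBKey it ≠ pvBKey h) := by
        rw [List.filter_filter]
        apply List.filter_congr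
        intro it _
        simp [PySem.Dict.contains_insert, Bool.not_or, beq_eq_decide]
      rw [hfil]
      simp only [List.filter_cons, hc', Bool.not_false, if_true, pvDD_cons, List.map_cons,
        List.append_assoc, List.cons_append, List.nil_append]

-- B's loop computes the stamped enumeration of the pure dedup, starting at the accumulator's length
theorem pv_loopB (xs result : List (List (String × String))) :
    pvBLoop xs result
      = result ++ (PySem.List.enumerate (pvDD xs) (result.length : Int)).map pvF := by
  induction hn : xs.length using Nat.strong_induction_on generalizing xs result with
  | _ n ih =>
    match xs with
    | [] => simp [pvBLoop_nil, pvDD_nil, PySem.List.enumerate_nil]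
    | head :: rest =>
      subst hn
      rw [pvBLoop_cons, pvDD_cons,
        ih ((rest.filter (fun it => pvBKey it ≠ pvBKey head)).length)
          (by simpa using Nat.lt_succ_of_le (List.length_filter_le _ _)) _ _ rfl]
      rw [show (((result ++ [((PySem.Dict.ofList head).insert "id" (PySem.Int.toStr (result.length : Int))).items]).length : Int)) = (result.length : Int) + 1 from by simp]
      simp [pvF, PySem.List.enumerate_cons]

-- ===== VERDICT (by name: the statement is the Claim_ definition above) =====
theorem my_process_combine_contexts_spec : Claim_equal_my_process_combine_contexts := by
  intro hl ll _
  unfold Spec_my_process_combine_contexts my_process_combine_contexts my_process_combine_contexts_alt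
  show (PySem.List.enumerate ((hl ++ ll).foldl pvStepA (PySem.Dict.empty, [])).2 0).map
      (fun p => (p.2.insert "id" (PySem.Int.toStr p.1)).items)
    = pvBLoop (hl ++ ll) []
  rw [pv_foldA, pv_loopB]
  have hfil : (hl ++ ll).filter
      (fun it => !(PySem.Dict.empty (κ := List (String × String)) (ν := PySem.Dict String String)).contains (pvBKey it)) = hl ++ ll := by
    apply List.filter_eq_self.mpr
    intro a _
    simp [pysem]
  rw [hfil]
  simp only [List.nil_append, List.length_nil, Nat.cast_zero]
  rw [pv_enumerate_map]
  simp [pvF, List.map_map, Function.comp_def]
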